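-- pv_equiv track=rewrite | github.com/krloer/CTF | PicoCTF/Cryptography/wiener_attack.py | get_expansions
-- ===== SOURCE A (Python) =====
-- def get_expansions(e, n):
--     exp = []
--     a = e // n
--     b = e % n
--     exp.append(a)
--
--     while (b > 0):
--         e = n
--         n = b
--         a = e // n
--         b = e % n
--         exp.append(a)
--
--     return exp
-- ===== SOURCE B (Python) =====
-- def get_expansions(e, n):
--     a = e // n
--     b = e % n
--     if b > 0:
--         return [a] + get_expansions(n, b)
--     return [a]
-- ===== Notes on version B (the rewrite author's own statement) =====
-- stated objective: simpler
-- what changed: Replaces the explicit while-loop that mutates e, n and an accumulated list with a direct recursion on the (divisor, remainder) pair, the classical recursive continued-fraction/Euclid formulation.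
import Mathlib
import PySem

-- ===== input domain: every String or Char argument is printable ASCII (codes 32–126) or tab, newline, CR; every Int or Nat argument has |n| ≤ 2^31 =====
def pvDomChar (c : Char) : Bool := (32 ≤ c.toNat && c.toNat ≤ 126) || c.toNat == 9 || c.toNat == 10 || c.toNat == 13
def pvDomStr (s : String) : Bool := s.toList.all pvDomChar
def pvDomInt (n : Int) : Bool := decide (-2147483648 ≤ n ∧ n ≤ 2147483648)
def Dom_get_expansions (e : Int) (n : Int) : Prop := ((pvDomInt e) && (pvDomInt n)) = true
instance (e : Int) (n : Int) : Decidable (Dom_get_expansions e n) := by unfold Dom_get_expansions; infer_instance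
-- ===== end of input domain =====

-- B replaces A's mutating while-loop with the classical recursion on (divisor, remainder); objective: simpler.


-- ===== PORT A =====
-- the while-loop: state is (e, n, b, exp); each iteration sets e := n, n := b, recomputes a, b, appends a
def geLoop (e n b : Int) (exp : List Int) : List Int :=
  if h : b > 0 then
    let e' := n
    let n' := b
    let a := PySem.Int.floordiv e' n'
    let b' := PySem.Int.mod e' n'
    geLoop e' n' b' (exp ++ [a])
  else exp
termination_by b.toNat
decreasing_by
  have h1 : PySem.Int.mod n b < b := PySem.Int.mod_lt n h
  have h2 : 0 ≤ PySem.Int.mod n b := PySem.Int.mod_nonneg n h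
  omega

def get_expansions (e : Int) (n : Int) : List Int :=
  let a := PySem.Int.floordiv e n
  let b := PySem.Int.mod e n
  geLoop e n b [a]

-- ===== PORT B =====
def get_expansions_alt (e : Int) (n : Int) : List Int :=
  let a := PySem.Int.floordiv e n
  let b := PySem.Int.mod e n
  if h : b > 0 then [a] ++ get_expansions_alt n b
  else [a]
termination_by (PySem.Int.mod e n).toNat
decreasing_by
  have h1 : PySem.Int.mod n (PySem.Int.mod e n) < PySem.Int.mod e n := PySem.Int.mod_lt n h
  have h2 : 0 ≤ PySem.Int.mod n (PySem.Int.mod e n) := PySem.Int.mod_nonneg n h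
  omega

-- ===== PRECONDITION & SPEC =====
-- A (and B) raise ZeroDivisionError when n = 0; nothing else is excluded.
def Pre_get_expansions (e : Int) (n : Int) : Prop := n ≠ 0
instance (e : Int) (n : Int) : Decidable (Pre_get_expansions e n) := by unfold Pre_get_expansions; infer_instance
def pvWitness_get_expansions : Int × Int := (17, 5)

def Spec_get_expansions (e : Int) (n : Int) (out : List Int) : Prop := out = get_expansions_alt e n
instance (e : Int) (n : Int) (out : List Int) : Decidable (Spec_get_expansions e n out) := by unfold Spec_get_expansions; infer_instance

-- ===== CLAIM (what is proved, stated in full; the proofs are below) =====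
def Claim_equal_get_expansions : Prop := ∀ (e : Int) (n : Int), Dom_get_expansions e n → Pre_get_expansions e n → Spec_get_expansions e n (get_expansions e n)

-- ===== LEMMAS AND PROOFS =====

-- loop/recursion correspondence: when b > 0, the loop starting from (n, b) appends exactly B's recursion on (n, b)
lemma geLoop_eq_alt : ∀ (k : Nat) (e n b : Int) (exp : List Int), b.toNat ≤ k → 0 < b →
    geLoop e n b exp = exp ++ get_expansions_alt n b := by
  intro k
  induction k with
  | zero => intro e n b exp hk hb; omega
  | succ k ih =>
    intro e n b exp hk hb
    rw [geLoop, get_expansions_alt]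
    simp only [hb, dite_true]
    have h0 : 0 ≤ PySem.Int.mod n b := PySem.Int.mod_nonneg n hb
    have h1 : PySem.Int.mod n b < b := PySem.Int.mod_lt n hb
    by_cases hb' : 0 < PySem.Int.mod n b
    · rw [ih n b (PySem.Int.mod n b) _ (by omega) hb']
      simp [hb']
    · have : ¬ (PySem.Int.mod n b > 0) := hb'
      rw [geLoop]
      simp [this]

lemma geLoop_stop (e n b : Int) (exp : List Int) (h : ¬ b > 0) : geLoop e n b exp = exp := by
  rw [geLoop]; simp [h]

-- ===== VERDICT (by name: the statement is the Claim_ definition above) =====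
theorem get_expansions_spec : Claim_equal_get_expansions := by
  intro e n _ _
  unfold Spec_get_expansions get_expansions
  simp only []
  by_cases hb : 0 < PySem.Int.mod e n
  · rw [geLoop_eq_alt (PySem.Int.mod e n).toNat e n (PySem.Int.mod e n) _ le_rfl hb]
    conv_rhs => rw [get_expansions_alt]
    simp only [hb, dite_true]
  · rw [geLoop_stop _ _ _ _ hb, get_expansions_alt]
    simp [hb]
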